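-- pv_equiv track=rewrite | github.com/zzzz465/PS | Python/programmers/17681.py | solution
-- ===== SOURCE A (Python) =====
-- def solution(n, arr1, arr2):
--     result = [[' '] * n for _ in range(n)]
--
--     values = zip(arr1, arr2)
--     for i, [val1, val2] in zip([*range(n)], values):
--         for j in range(n-1, -1, -1):
--             flag = val1 & 1 | val2 & 1
--             val1 = val1 >> 1
--             val2 = val2 >> 1
--
--             if flag != 0:
--                 result[i][j] = '#'
--
--     return result
-- ===== SOURCE B (Python) =====
-- def solution(n, arr1, arr2):
--     rows = [[' '] * n for _ in range(n)]
--     m = min(n, len(arr1), len(arr2))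
--     for i in range(m):
--         v = (arr1[i] | arr2[i]) & ((1 << n) - 1)
--         rows[i] = ['#' if c == '1' else ' ' for c in format(v, '0%db' % n)]
--     return rows
-- ===== Notes on version B (the rewrite author's own statement) =====
-- stated objective: idiomatic
-- what changed: B replaces A's per-cell inner loop (shift/mask one bit at a time into a preallocated row) by rendering each whole row at once: v = (arr1[i] | arr2[i]) & ((1<<n)-1) formatted as an n-digit binary string mapped to '#'/' ', keeping untouched trailing rows as all spaces.
import Mathlib
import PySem

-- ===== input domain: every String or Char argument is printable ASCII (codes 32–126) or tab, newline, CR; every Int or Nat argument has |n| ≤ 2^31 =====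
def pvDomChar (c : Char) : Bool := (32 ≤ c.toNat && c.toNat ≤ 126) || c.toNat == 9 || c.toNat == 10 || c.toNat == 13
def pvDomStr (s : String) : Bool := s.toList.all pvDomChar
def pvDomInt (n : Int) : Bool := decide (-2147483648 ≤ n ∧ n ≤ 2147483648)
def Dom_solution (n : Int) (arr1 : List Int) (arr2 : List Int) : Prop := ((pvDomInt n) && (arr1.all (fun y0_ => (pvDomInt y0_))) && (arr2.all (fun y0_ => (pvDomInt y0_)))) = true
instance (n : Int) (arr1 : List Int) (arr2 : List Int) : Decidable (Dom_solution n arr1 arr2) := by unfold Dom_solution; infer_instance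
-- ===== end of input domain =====

-- B renders each row at once from the row's OR-value masked to n bits (Python: format(v, '0nb'))
-- instead of A's bit-by-bit shift/mask inner loop (same asymptotic cost).

-- ===== PORT A =====
-- literal transliteration of A: grid of spaces, zip over rows, inner loop j = n-1..0
-- peeling bits with `& 1` and `>> 1` and writing '#' where the OR of the two bits is set.
def solution (n : Int) (arr1 : List Int) (arr2 : List Int) : List (List String) :=
  let result := (PySem.List.pyRange 0 n 1).map (fun _ => List.replicate n.toNat " ")
  let values := arr1.zip arr2
  ((PySem.List.pyRange 0 n 1).zip values).foldl
    (fun res iv =>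
      ((PySem.List.pyRange (n-1) (-1) (-1)).foldl
        (fun (st : Int × Int × List (List String)) j =>
          let flag := PySem.Int.bor (PySem.Int.band st.1 1) (PySem.Int.band st.2.1 1)
          let v1 := st.1 >>> (1 : Nat)
          let v2 := st.2.1 >>> (1 : Nat)
          (v1, v2,
            if flag ≠ 0 then st.2.2.set iv.1.toNat ((st.2.2.getD iv.1.toNat []).set j.toNat "#")
            else st.2.2))
        (iv.2.1, iv.2.2, res)).2.2)
    result

-- ===== PORT B =====
-- hand port of Python's format(w, 'b') for w ≥ 0 (exact there): most-significant-first binary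
-- digits, empty for 0; structural fuel ≥ w so the kernel can evaluate it.
def binDigitsAux : Nat → Nat → List Char
  | _, 0 => []
  | 0, _+1 => []
  | f+1, v+1 => binDigitsAux f ((v+1)/2) ++ [if (v+1) % 2 = 1 then '1' else '0']

def binDigits (w : Nat) : List Char := binDigitsAux w w

-- format(w, '0<width>b') for w ≥ 0: digits of w ('0' for 0), zero-padded to width.
def fmtBin (w width : Nat) : List Char :=
  let d := if w = 0 then ['0'] else binDigits w
  List.replicate (width - d.length) '0' ++ d

-- literal transliteration of B: untouched grid of spaces, then for each reached row i
-- overwrite it with the rendering of (arr1[i] | arr2[i]) & ((1 << n) - 1).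
def solution_alt (n : Int) (arr1 : List Int) (arr2 : List Int) : List (List String) :=
  let rows := (List.range n.toNat).map (fun _ => List.replicate n.toNat " ")
  let m := min n (min (arr1.length : Int) (arr2.length : Int))
  (List.range m.toNat).foldl
    (fun rows i =>
      let v := PySem.Int.band (PySem.Int.bor (arr1.getD i 0) (arr2.getD i 0)) ((1 <<< n.toNat) - 1)
      rows.set i ((fmtBin v.toNat n.toNat).map (fun c => if c = '1' then "#" else " ")))
    rows

-- ===== PRECONDITION & SPEC =====
def Spec_solution (n : Int) (arr1 : List Int) (arr2 : List Int) (out : List (List String)) : Prop := out = solution_alt n arr1 arr2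
instance (n : Int) (arr1 : List Int) (arr2 : List Int) (out : List (List String)) : Decidable (Spec_solution n arr1 arr2 out) := by unfold Spec_solution; infer_instance

-- ===== CLAIM (what is proved, stated in full; the proofs are below) =====
def Claim_equal_solution : Prop := ∀ (n : Int) (arr1 : List Int) (arr2 : List Int), Dom_solution n arr1 arr2 → Spec_solution n arr1 arr2 (solution n arr1 arr2)

-- ===== LEMMAS AND PROOFS =====

theorem pv_ediv2 (v : Int) (t : Nat) : v / 2 / 2^t = v / 2^(t+1) := by
  rw [Int.ediv_ediv_of_nonneg (by norm_num : (0:Int) ≤ 2)]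
  norm_num [pow_succ, mul_comm]

theorem pv_shr1 (v : Int) : v >>> (1 : Nat) = v / 2 := by
  rw [Int.shiftRight_eq_div_pow]; norm_num

theorem pv_one_shl (k : Nat) : ((1 <<< k : Nat) : Int) - 1 = 2^k - 1 := by
  rw [Nat.one_shiftLeft]; push_cast; ring

theorem pv_band_one (v : Int) : PySem.Int.band v 1 = v % 2 := by
  unfold PySem.Int.band
  split_ifs with h h2 h2
  · have : v.toNat &&& (1:Int).toNat = v.toNat % 2 := Nat.and_one_is_mod _
    rw [this]; omega
  · omega
  · have : (1:Int).toNat &&& (-v-1).toNat = (-v-1).toNat % 2 := Nat.one_and_eq_mod_two _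
    rw [this]; omega
  · omega

theorem pv_bor_parity (a b : Int) : ((PySem.Int.bor a b) % 2 = 1) ↔ (a % 2 = 1 ∨ b % 2 = 1) := by
  unfold PySem.Int.bor
  split_ifs with h h2 h2
  · have := Nat.or_mod_two_eq_one (a := a.toNat) (b := b.toNat); omega
  · have h1 := Nat.and_le_left (n := (-b-1).toNat) (m := a.toNat)
    have h3 := Nat.and_mod_two_eq_one (a := (-b-1).toNat) (b := a.toNat); omega
  · have h1 := Nat.and_le_left (n := (-a-1).toNat) (m := b.toNat)
    have h3 := Nat.and_mod_two_eq_one (a := (-a-1).toNat) (b := b.toNat); omega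
  · have h3 := Nat.and_mod_two_eq_one (a := (-a-1).toNat) (b := (-b-1).toNat); omega

theorem pv_bor_half (a b : Int) : (PySem.Int.bor a b) / 2 = PySem.Int.bor (a/2) (b/2) := by
  unfold PySem.Int.bor
  split_ifs with h h2 h3 h4 h4 h5 h6 h6 <;>
    first
      | (exfalso; omega)
      | skip
  · have := Nat.or_div_two (a := a.toNat) (b := b.toNat)
    have e1 : (a/2).toNat = a.toNat/2 := by omega
    have e2 : (b/2).toNat = b.toNat/2 := by omega
    rw [e1, e2]
    omega
  · have h1 := Nat.and_le_left (n := (-b-1).toNat) (m := a.toNat)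
    have h1' := Nat.and_le_left (n := (-b-1).toNat/2) (m := a.toNat/2)
    have hd := Nat.and_div_two (a := (-b-1).toNat) (b := a.toNat)
    have h3 := Nat.and_mod_two_eq_one (a := (-b-1).toNat) (b := a.toNat)
    have e1 : (a/2).toNat = a.toNat/2 := by omega
    have e2 : (-(b/2)-1).toNat = (-b-1).toNat/2 := by omega
    rw [e1, e2]
    omega
  · have h1 := Nat.and_le_left (n := (-a-1).toNat) (m := b.toNat)
    have h1' := Nat.and_le_left (n := (-a-1).toNat/2) (m := b.toNat/2)
    have hd := Nat.and_div_two (a := (-a-1).toNat) (b := b.toNat)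
    have h3 := Nat.and_mod_two_eq_one (a := (-a-1).toNat) (b := b.toNat)
    have e1 : (b/2).toNat = b.toNat/2 := by omega
    have e2 : (-(a/2)-1).toNat = (-a-1).toNat/2 := by omega
    rw [e1, e2]
    omega
  · have hd := Nat.and_div_two (a := (-a-1).toNat) (b := (-b-1).toNat)
    have h3 := Nat.and_mod_two_eq_one (a := (-a-1).toNat) (b := (-b-1).toNat)
    have e1 : (-(a/2)-1).toNat = (-a-1).toNat/2 := by omega
    have e2 : (-(b/2)-1).toNat = (-b-1).toNat/2 := by omega
    rw [e1, e2]
    omega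

theorem pv_flag_iff (v1 v2 : Int) :
    (PySem.Int.bor (PySem.Int.band v1 1) (PySem.Int.band v2 1) ≠ 0) ↔ (v1 % 2 = 1 ∨ v2 % 2 = 1) := by
  rw [pv_band_one, pv_band_one]
  have h1 : v1 % 2 = 0 ∨ v1 % 2 = 1 := by omega
  have h2 : v2 % 2 = 0 ∨ v2 % 2 = 1 := by omega
  rcases h1 with h1 | h1 <;> rcases h2 with h2 | h2 <;> rw [h1, h2] <;> simp <;> decide

theorem pv_bor_bit (t : Nat) : ∀ (a b : Int),
    ((PySem.Int.bor a b) / 2^t % 2 = 1) ↔ (a / 2^t % 2 = 1 ∨ b / 2^t % 2 = 1) := by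
  induction t with
  | zero => intro a b; simpa using pv_bor_parity a b
  | succ t ih =>
    intro a b
    rw [← pv_ediv2, ← pv_ediv2 a, ← pv_ediv2 b, pv_bor_half]
    exact ih _ _

theorem pv_mask (u : Int) (k : Nat) : PySem.Int.band u (2^k - 1) = u % 2^k := by
  have hM : ((2^k : Nat) : Int) = 2^k := by push_cast; ring
  have hM1 : (1:Int) ≤ 2^k := one_le_pow₀ (by norm_num)
  unfold PySem.Int.band
  split_ifs with h h2 h2
  · have e1 : ((2:Int)^k - 1).toNat = 2^k - 1 := by omega
    rw [e1, Nat.and_two_pow_sub_one_eq_mod]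
    push_cast
    rw [Int.toNat_of_nonneg h]
  · omega
  · have e1 : ((2:Int)^k - 1).toNat = 2^k - 1 := by omega
    rw [e1, Nat.and_comm, Nat.and_two_pow_sub_one_eq_mod]
    -- u < 0: Python u & (2^k-1) = 2^k - 1 - ((-u-1) mod 2^k) = u mod 2^k
    have hx : 0 ≤ -u - 1 := by omega
    have hxm0 : 0 ≤ (-u-1) % 2^k := Int.emod_nonneg _ (by positivity)
    have hxml : (-u-1) % 2^k < 2^k := Int.emod_lt_of_pos _ (by positivity)
    have hu : u = (2^k - 1 - (-u-1) % 2^k) + 2^k * (-((-u-1)/2^k + 1)) := by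
      have hdef : (-u-1) % 2^k = (-u-1) - 2^k * ((-u-1)/2^k) := Int.emod_def _ _
      have hmul : (2:Int)^k * -((-u-1)/2^k + 1) = -(2^k * ((-u-1)/2^k)) - 2^k := by ring
      omega
    have hres : u % 2^k = 2^k - 1 - (-u-1) % 2^k := by
      conv_lhs => rw [hu]
      rw [Int.add_mul_emod_self_left]
      exact Int.emod_eq_of_lt (by omega) (by omega)
    rw [hres]
    have e2 : ((-u-1).toNat % 2^k : Nat) = ((-u-1) % 2^k).toNat := by
      have : ((-u-1).toNat % (2^k:Nat) : Int) = (-u-1) % 2^k := by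
        push_cast
        rw [Int.toNat_of_nonneg hx]
      omega
    rw [e2]
    omega
  · omega

theorem pv_mod_window (u : Int) (k t : Nat) (ht : t < k) :
    (u % 2^k) / 2^t % 2 = u / 2^t % 2 := by
  have hsplit : (2:Int)^k = 2^(k-t-1) * 2 * 2^t := by
    rw [mul_assoc, ← pow_succ']
    rw [← pow_add]
    congr 1
    omega
  have hq : u % 2^k = u + (-(2^(k-t-1) * 2 * (u / 2^k))) * 2^t := by
    rw [Int.emod_def, hsplit]; ring
  rw [hq, Int.add_mul_ediv_right _ _ (by positivity : (2:Int)^t ≠ 0)]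
  have hlin : (2:Int)^(k-t-1) * 2 * (u / 2^k) = 2 * (2^(k-t-1) * (u / 2^k)) := by ring
  rw [hlin]
  omega

theorem pv_toNat_bit (x : Int) (hx : 0 ≤ x) (t : Nat) :
    (x.toNat / 2^t % 2 = 1) ↔ (x / 2^t % 2 = 1) := by
  have : ((x.toNat / 2^t : Nat) : Int) = x / 2^t := by
    push_cast
    rw [Int.toNat_of_nonneg hx]
  omega

-- the one bit-level bridge the row proof needs
theorem pv_bit_bridge (a b : Int) (k t : Nat) (ht : t < k) :
    ((PySem.Int.band (PySem.Int.bor a b) (2^k - 1)).toNat / 2^t % 2 = 1)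
      ↔ (a / 2^t % 2 = 1 ∨ b / 2^t % 2 = 1) := by
  rw [pv_mask]
  have hpos : (0:Int) < 2^k := by positivity
  rw [pv_toNat_bit _ (Int.emod_nonneg _ (by positivity)) t, pv_mod_window _ _ _ ht]
  exact pv_bor_bit t a b

theorem pv_w_lt (a b : Int) (k : Nat) :
    (PySem.Int.band (PySem.Int.bor a b) (2^k - 1)).toNat < 2^k := by
  rw [pv_mask]
  have h1 := Int.emod_lt_of_pos (PySem.Int.bor a b) (b := 2^k) (by positivity)
  have : ((2^k : Nat) : Int) = 2^k := by push_cast; ring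
  omega

theorem binDigitsAux_zero (f : Nat) : binDigitsAux f 0 = [] := by cases f <;> rfl

theorem binDigitsAux_stable (f g v : Nat) (hf : v ≤ f) (hg : v ≤ g) :
    binDigitsAux f v = binDigitsAux g v := by
  induction f using Nat.strong_induction_on generalizing g v with
  | _ f ih =>
    match f, g, v with
    | f, g, 0 => rw [binDigitsAux_zero, binDigitsAux_zero]
    | f+1, g+1, v+1 =>
      simp only [binDigitsAux]
      rw [ih f (by omega) (g := g) ((v+1)/2) (by omega) (by omega)]

theorem binDigits_succ (v : Nat) :
    binDigits (v+1) = binDigits ((v+1)/2) ++ [if (v+1) % 2 = 1 then '1' else '0'] := by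
  show binDigitsAux (v+1) (v+1) = _
  simp only [binDigitsAux]
  rw [binDigitsAux_stable v ((v+1)/2) ((v+1)/2) (by omega) (by omega)]
  rfl

-- LSB-first characterisation of the padded digit list
theorem pv_digits_lsb (k : Nat) : ∀ w : Nat, w < 2^k →
    (binDigits w).reverse ++ List.replicate (k - (binDigits w).length) '0'
      = (List.range k).map (fun t => if w / 2^t % 2 = 1 then '1' else '0') := by
  induction k with
  | zero =>
    intro w hw
    interval_cases w
    simp [binDigits, binDigitsAux]
  | succ k ih =>
    intro w hw
    have hrange : List.range (k+1) = 0 :: (List.range k).map (· + 1) := by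
      rw [List.range_succ_eq_map]
    rw [hrange]
    have hmap : ((List.range k).map (· + 1)).map (fun t => if w / 2^t % 2 = 1 then '1' else '0')
        = (List.range k).map (fun t => if (w/2) / 2^t % 2 = 1 then '1' else '0') := by
      rw [List.map_map]
      refine List.map_congr_left (fun t _ => ?_)
      have : w / 2^(t+1) = (w/2) / 2^t := by
        rw [Nat.div_div_eq_div_mul, pow_succ']
      simp only [Function.comp]
      rw [this]
    rw [List.map_cons, hmap]
    rcases Nat.eq_zero_or_pos w with h0 | hpos
    · subst h0
      rw [← ih 0 (by positivity)]
      simp [binDigits, binDigitsAux_zero, List.replicate_succ]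
    · obtain ⟨v, rfl⟩ : ∃ v, w = v + 1 := ⟨w - 1, by omega⟩
      rw [binDigits_succ]
      have hlen2 : ((v+1)/2) < 2^k := by
        have : (2:Nat)^(k+1) = 2 * 2^k := by ring
        omega
      have := ih ((v+1)/2) hlen2
      simp only [List.reverse_append, List.reverse_singleton, List.length_append,
        List.length_singleton, List.cons_append, List.nil_append]
      rw [Nat.succ_sub_succ, this]
      simp

theorem pv_fmtBin_eq (k w : Nat) (hk : 1 ≤ k) (hw : w < 2^k) :
    fmtBin w k = ((List.range k).map (fun t => if w / 2^t % 2 = 1 then '1' else '0')).reverse := by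
  rw [← pv_digits_lsb k w hw]
  unfold fmtBin
  rcases Nat.eq_zero_or_pos w with h0 | hpos
  · subst h0
    simp [binDigits, binDigitsAux_zero, List.reverse_replicate]
    rw [show ['0'] = List.replicate 1 '0' from rfl, ← List.replicate_add]
    congr 1
    omega
  · simp only [Nat.pos_iff_ne_zero.mp hpos, if_false]
    rw [List.reverse_append, List.reverse_reverse, List.reverse_replicate]

theorem pv_pyRange_up (n : Int) :
    PySem.List.pyRange 0 n 1 = (List.range n.toNat).map (fun (k : Nat) => (k : Int)) := by
  unfold PySem.List.pyRange
  norm_num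
  have hc : (if 0 < n then n.toNat else 0) = n.toNat := by split_ifs <;> omega
  rw [hc]

theorem pv_pyRange_down (n : Int) :
    PySem.List.pyRange (n-1) (-1) (-1)
      = (List.range n.toNat).map (fun (t : Nat) => ((n.toNat - 1 - t : Nat) : Int)) := by
  unfold PySem.List.pyRange
  norm_num
  have hc : (if 0 < n then n.toNat else 0) = n.toNat := by split_ifs <;> omega
  rw [hc]
  refine List.map_congr_left fun t ht => ?_
  rw [List.mem_range] at ht
  omega

theorem pv_zipA (n : Nat) (arr1 arr2 : List Int) :
    (((List.range n).map (fun (k : Nat) => (k : Int))).zip (arr1.zip arr2))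
      = (List.range (min n (min arr1.length arr2.length))).map
          (fun (i : Nat) => ((i : Int), (arr1.getD i 0, arr2.getD i 0))) := by
  apply List.ext_getElem
  · simp
  · intro i h1 h2
    simp only [List.length_zip, List.length_map, List.length_range] at h1
    simp only [List.getElem_zip, List.getElem_map, List.getElem_range]
    rw [List.getD_eq_getElem _ _ (by omega), List.getD_eq_getElem _ _ (by omega)]

-- row-level clean step: peel one bit of each value, write '#' at position j if either is set
def rowStep (st : Int × Int × List String) (j : Nat) : Int × Int × List String :=
  (st.1 / 2, st.2.1 / 2,
    if st.1 % 2 = 1 ∨ st.2.1 % 2 = 1 then st.2.2.set j "#" else st.2.2)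

theorem pv_innerRow : ∀ (k K : Nat), k ≤ K → ∀ (v1 v2 : Int) (row : List String) (j : Nat),
    ((((List.range k).map (fun t => K - 1 - t)).foldl rowStep (v1, v2, row)).2.2)[j]?
      = if K - k ≤ j ∧ j < K ∧ j < row.length ∧ (v1 / 2^(K-1-j) % 2 = 1 ∨ v2 / 2^(K-1-j) % 2 = 1)
        then some "#" else row[j]? := by
  intro k
  induction k with
  | zero =>
    intro K hk v1 v2 row j
    simp only [List.range_zero, List.map_nil, List.foldl_nil]
    split_ifs with h
    · omega
    · rfl
  | succ k ih =>
    intro K hk v1 v2 row j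
    rw [List.range_succ_eq_map]
    simp only [List.map_cons, List.map_map, List.foldl_cons]
    have hmapeq : (List.range k).map ((fun t => K - 1 - t) ∘ Nat.succ)
        = (List.range k).map (fun t => (K-1) - 1 - t) := by
      refine List.map_congr_left fun t ht => ?_
      simp only [Function.comp]
      omega
    rw [hmapeq]
    have hstep : rowStep (v1, v2, row) (K - 1)
        = (v1/2, v2/2, if v1 % 2 = 1 ∨ v2 % 2 = 1 then row.set (K-1) "#" else row) := rfl
    simp only [Nat.sub_zero]
    rw [hstep, ih (K-1) (by omega)]
    have hlen : (if v1 % 2 = 1 ∨ v2 % 2 = 1 then row.set (K-1) "#" else row).length = row.length := by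
      split_ifs <;> simp
    rw [hlen]
    by_cases hjK : j < K - 1
    · -- untouched by the head write; bits shift by one
      have hbit1 : v1 / 2 / 2^(K-1-1-j) = v1 / 2^(K-1-j) := by
        rw [pv_ediv2]
        congr 1
        congr 1
        omega
      have hbit2 : v2 / 2 / 2^(K-1-1-j) = v2 / 2^(K-1-j) := by
        rw [pv_ediv2]
        congr 1
        congr 1
        omega
      rw [hbit1, hbit2]
      have hrow : (if v1 % 2 = 1 ∨ v2 % 2 = 1 then row.set (K-1) "#" else row)[j]? = row[j]? := by
        split_ifs with h
        · rw [List.getElem?_set_ne (by omega)]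
        · rfl
      rw [hrow]
      split_ifs with h1 h2 h2 <;> first | rfl | omega
    · by_cases hjK2 : j = K - 1
      · -- the position written by the head step
        subst hjK2
        have he : K - 1 - (K - 1) = 0 := by omega
        simp only [he, pow_zero, Int.ediv_one]
        rw [if_neg (by omega)]
        by_cases hbit : v1 % 2 = 1 ∨ v2 % 2 = 1
        · rw [if_pos hbit, List.getElem?_set, if_pos rfl]
          by_cases hl : K - 1 < row.length
          · rw [if_pos hl, if_pos (by exact ⟨by omega, by omega, hl, hbit⟩)]
          · rw [if_neg hl, if_neg (by omega), List.getElem?_eq_none (by omega)]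
        · rw [if_neg hbit, if_neg (by omega)]
      · -- j ≥ K: untouched everywhere
        have hrow : (if v1 % 2 = 1 ∨ v2 % 2 = 1 then row.set (K-1) "#" else row)[j]? = row[j]? := by
          split_ifs with h
          · rw [List.getElem?_set_ne (by omega)]
          · rfl
        rw [hrow, if_neg (by omega), if_neg (by omega)]

-- grid-level clean step: same as rowStep but acting on row i of the whole grid
def gridStep (i : Nat) (st : Int × Int × List (List String)) (j : Nat) : Int × Int × List (List String) :=
  (st.1 / 2, st.2.1 / 2,
    if st.1 % 2 = 1 ∨ st.2.1 % 2 = 1 then st.2.2.set i ((st.2.2.getD i []).set j "#") else st.2.2)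

theorem pv_innerRes (js : List Nat) : ∀ (i : Nat) (v1 v2 : Int) (res : List (List String)),
    i < res.length →
    js.foldl (gridStep i) (v1, v2, res)
      = ((js.foldl rowStep (v1, v2, res.getD i [])).1,
         (js.foldl rowStep (v1, v2, res.getD i [])).2.1,
         res.set i (js.foldl rowStep (v1, v2, res.getD i [])).2.2) := by
  induction js with
  | nil =>
    intro i v1 v2 res hi
    simp only [List.foldl_nil]
    rw [List.getD_eq_getElem _ _ hi, List.set_getElem_self hi]
  | cons j js ih =>
    intro i v1 v2 res hi
    simp only [List.foldl_cons]
    have hgs : gridStep i (v1, v2, res) j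
        = (v1/2, v2/2, if v1 % 2 = 1 ∨ v2 % 2 = 1
            then res.set i ((res.getD i []).set j "#") else res) := rfl
    have hrs : rowStep (v1, v2, res.getD i []) j
        = (v1/2, v2/2, if v1 % 2 = 1 ∨ v2 % 2 = 1
            then (res.getD i []).set j "#" else res.getD i []) := rfl
    rw [hgs, hrs]
    by_cases hc : v1 % 2 = 1 ∨ v2 % 2 = 1
    · rw [if_pos hc, if_pos hc,
        ih i (v1/2) (v2/2) _ (by simpa using hi)]
      have h1 : (res.set i ((res.getD i []).set j "#")).getD i []
          = (res.getD i []).set j "#" := by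
        rw [List.getD_eq_getElem _ _ (by simpa using hi)]
        exact List.getElem_set_self (by simpa using hi)
      rw [h1, List.set_set]
    · rw [if_neg hc, if_neg hc, ih i (v1/2) (v2/2) _ hi]

theorem pv_rowA (N : Nat) (v1 v2 : Int) :
    (((List.range N).map (fun t => N - 1 - t)).foldl rowStep (v1, v2, List.replicate N " ")).2.2
      = ((List.range N).map
          (fun (t : Nat) => if v1 / 2^t % 2 = 1 ∨ v2 / 2^t % 2 = 1 then ("#" : String) else " ")).reverse := by
  apply List.ext_getElem?
  intro j
  rw [pv_innerRow N N le_rfl]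
  by_cases hj : j < N
  · rw [List.getElem?_reverse (by simpa using hj)]
    have hlt : N - 1 - j < N := by omega
    simp only [List.length_map, List.length_range]
    rw [List.getElem?_map, List.getElem?_range hlt]
    simp only [List.length_replicate, List.getElem?_replicate, Option.map_some]
    by_cases hb : v1 / 2^(N-1-j) % 2 = 1 ∨ v2 / 2^(N-1-j) % 2 = 1
    · rw [if_pos ⟨by omega, hj, hj, hb⟩, if_pos hb]
    · rw [if_neg (by tauto), if_neg hb, if_pos hj]
  · rw [if_neg (by omega)]
    rw [List.getElem?_eq_none (by simpa using hj), List.getElem?_eq_none (by simp; omega)]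

theorem pv_rowB (N : Nat) (hN : 1 ≤ N) (a b : Int) :
    (fmtBin (PySem.Int.band (PySem.Int.bor a b) ((1 <<< N) - 1)).toNat N).map
        (fun c => if c = '1' then ("#" : String) else " ")
      = ((List.range N).map
          (fun (t : Nat) => if a / 2^t % 2 = 1 ∨ b / 2^t % 2 = 1 then ("#" : String) else " ")).reverse := by
  rw [pv_one_shl, pv_fmtBin_eq N _ hN (pv_w_lt a b N), List.map_reverse, List.map_map]
  congr 1
  refine List.map_congr_left fun t ht => ?_
  rw [List.mem_range] at ht
  have hbr := pv_bit_bridge a b N t ht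
  simp only [Function.comp_apply]
  by_cases hb : a / 2^t % 2 = 1 ∨ b / 2^t % 2 = 1
  · have h1 : (if (PySem.Int.band (PySem.Int.bor a b) (2^N - 1)).toNat / 2^t % 2 = 1
        then '1' else '0') = '1' := if_pos (hbr.mpr hb)
    rw [h1, if_pos rfl, if_pos hb]
  · have h1 : (if (PySem.Int.band (PySem.Int.bor a b) (2^N - 1)).toNat / 2^t % 2 = 1
        then '1' else '0') = '0' := if_neg (fun hc => hb (hbr.mp hc))
    rw [h1, if_neg (by decide), if_neg hb]

def pvInit (N : Nat) : List (List String) := (List.range N).map (fun _ => List.replicate N " ")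

def pvRowB (N : Nat) (a b : Int) : List String :=
  (fmtBin (PySem.Int.band (PySem.Int.bor a b) ((1 <<< N) - 1)).toNat N).map
    (fun c => if c = '1' then ("#" : String) else " ")

def pvStepA (N : Nat) (arr1 arr2 : List Int) (res : List (List String)) (i : Nat) : List (List String) :=
  (((List.range N).map (fun t => N - 1 - t)).foldl (gridStep i)
    (arr1.getD i 0, arr2.getD i 0, res)).2.2

theorem pv_outer (N : Nat) (arr1 arr2 : List Int) (M : Nat) (hMN : M ≤ N) :
    ∀ k, k ≤ M →
      ((List.range k).foldl (pvStepA N arr1 arr2) (pvInit N)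
          = (List.range k).foldl
              (fun rows i => rows.set i (pvRowB N (arr1.getD i 0) (arr2.getD i 0))) (pvInit N))
      ∧ ((List.range k).foldl (pvStepA N arr1 arr2) (pvInit N)).length = N
      ∧ ∀ i, k ≤ i → i < N →
          ((List.range k).foldl (pvStepA N arr1 arr2) (pvInit N))[i]? = some (List.replicate N " ") := by
  intro k
  induction k with
  | zero =>
    intro _
    refine ⟨rfl, by simp [pvInit], fun i _ hiN => ?_⟩
    simp [pvInit, hiN]
  | succ k ih =>
    intro hk
    obtain ⟨heq, hlen, hinv⟩ := ih (by omega)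
    have hkN : k < N := by omega
    have hstep : (List.range (k+1)).foldl (pvStepA N arr1 arr2) (pvInit N)
        = pvStepA N arr1 arr2 ((List.range k).foldl (pvStepA N arr1 arr2) (pvInit N)) k := by
      rw [List.range_succ, List.foldl_append, List.foldl_cons, List.foldl_nil]
    have hstepB : (List.range (k+1)).foldl
          (fun rows i => rows.set i (pvRowB N (arr1.getD i 0) (arr2.getD i 0))) (pvInit N)
        = ((List.range k).foldl
            (fun rows i => rows.set i (pvRowB N (arr1.getD i 0) (arr2.getD i 0))) (pvInit N)).set k
            (pvRowB N (arr1.getD k 0) (arr2.getD k 0)) := by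
      rw [List.range_succ, List.foldl_append, List.foldl_cons, List.foldl_nil]
    set Acc := (List.range k).foldl (pvStepA N arr1 arr2) (pvInit N) with hAcc
    have hrowk : Acc.getD k [] = List.replicate N " " := by
      rw [List.getD_eq_getElem?_getD, hinv k le_rfl hkN]
      rfl
    have hA : pvStepA N arr1 arr2 Acc k
        = Acc.set k (pvRowB N (arr1.getD k 0) (arr2.getD k 0)) := by
      unfold pvStepA
      rw [pv_innerRes _ k _ _ Acc (by omega)]
      rw [hrowk, pv_rowA, pvRowB, pv_rowB N (by omega)]
    refine ⟨?_, ?_, ?_⟩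
    · rw [hstep, hstepB, hA, heq]
    · rw [hstep, hA]
      simpa using hlen
    · intro i hi hiN
      rw [hstep, hA, List.getElem?_set_ne (by omega)]
      exact hinv i (by omega) hiN

theorem pv_portA_inner (n i v1 v2 : Int) (res : List (List String)) :
    ((PySem.List.pyRange (n-1) (-1) (-1)).foldl
      (fun (st : Int × Int × List (List String)) j =>
        let flag := PySem.Int.bor (PySem.Int.band st.1 1) (PySem.Int.band st.2.1 1)
        let w1 := st.1 >>> (1 : Nat)
        let w2 := st.2.1 >>> (1 : Nat)
        (w1, w2,
          if flag ≠ 0 then st.2.2.set i.toNat ((st.2.2.getD i.toNat []).set j.toNat "#")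
          else st.2.2))
      (v1, v2, res)).2.2
    = (((List.range n.toNat).map (fun t => n.toNat - 1 - t)).foldl (gridStep i.toNat)
        (v1, v2, res)).2.2 := by
  rw [pv_pyRange_down, List.foldl_map, List.foldl_map]
  have hf : (fun (st : Int × Int × List (List String)) (t : Nat) =>
        (fun (st : Int × Int × List (List String)) (j : Int) =>
          let flag := PySem.Int.bor (PySem.Int.band st.1 1) (PySem.Int.band st.2.1 1)
          let w1 := st.1 >>> (1 : Nat)
          let w2 := st.2.1 >>> (1 : Nat)
          (w1, w2,
            if flag ≠ 0 then st.2.2.set i.toNat ((st.2.2.getD i.toNat []).set j.toNat "#")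
            else st.2.2)) st (((n.toNat - 1 - t : Nat) : Int)))
      = fun st t => gridStep i.toNat st (n.toNat - 1 - t) := by
    funext st t
    show (st.1 >>> (1:Nat), st.2.1 >>> (1:Nat),
        if PySem.Int.bor (PySem.Int.band st.1 1) (PySem.Int.band st.2.1 1) ≠ 0
        then st.2.2.set i.toNat ((st.2.2.getD i.toNat []).set ((n.toNat - 1 - t : Nat) : Int).toNat "#")
        else st.2.2)
      = gridStep i.toNat st (n.toNat - 1 - t)
    unfold gridStep
    rw [pv_shr1, pv_shr1, Int.toNat_natCast]
    refine congrArg (Prod.mk _) (congrArg (Prod.mk _) ?_)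
    exact if_congr (pv_flag_iff st.1 st.2.1) rfl rfl
  rw [hf]

-- ===== VERDICT (by name: the statement is the Claim_ definition above) =====
theorem solution_spec : Claim_equal_solution := by
  unfold Claim_equal_solution
  intro n arr1 arr2 _
  unfold Spec_solution solution solution_alt
  dsimp only
  have hM : (min n (min (arr1.length : Int) (arr2.length : Int))).toNat
      = min n.toNat (min arr1.length arr2.length) := by omega
  rw [pv_pyRange_up, pv_zipA, List.foldl_map, hM]
  set N := n.toNat with hN
  set M := min N (min arr1.length arr2.length) with hMdef
  have hinit : ((List.range N).map (fun (k : Nat) => (k : Int))).map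
      (fun _ => List.replicate N " ") = pvInit N := by
    rw [List.map_map]; rfl
  rw [hinit]
  have hA : (List.range M).foldl
      (fun (res : List (List String)) (i : Nat) =>
        ((PySem.List.pyRange (n-1) (-1) (-1)).foldl
          (fun (st : Int × Int × List (List String)) j =>
            let flag := PySem.Int.bor (PySem.Int.band st.1 1) (PySem.Int.band st.2.1 1)
            let w1 := st.1 >>> (1 : Nat)
            let w2 := st.2.1 >>> (1 : Nat)
            (w1, w2,
              if flag ≠ 0
              then st.2.2.set ((i : Int), (arr1.getD i 0, arr2.getD i 0)).1.toNat
                ((st.2.2.getD ((i : Int), (arr1.getD i 0, arr2.getD i 0)).1.toNat []).set j.toNat "#")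
              else st.2.2))
          (((i : Int), (arr1.getD i 0, arr2.getD i 0)).2.1,
           ((i : Int), (arr1.getD i 0, arr2.getD i 0)).2.2, res)).2.2)
      (pvInit N)
    = (List.range M).foldl (pvStepA N arr1 arr2) (pvInit N) := by
    apply List.foldl_ext
    intro acc i _
    have h := pv_portA_inner n (i : Int) (arr1.getD i 0) (arr2.getD i 0) acc
    simp only [Int.toNat_natCast] at h
    exact h.trans rfl
  exact hA.trans ((pv_outer N arr1 arr2 M (by omega) M le_rfl).1)
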